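-- pv_equiv track=rewrite | github.com/xingfanxia/ChangshaCamp2016 | Programming Class Resources/Python Dev Projects/decrytion/mengd_leea/decryption.py | frequencyMatching
-- ===== SOURCE A (Python) =====
-- def frequencyMatching(list,frequency):
--
--     index = 0
--     character = ''
--     for j in list:
--         if list[index]==frequency:
--             character = chr(index+97)
--             index+=1
--
--         else:
--             index+=1
--
--     return character
-- ===== SOURCE B (Python) =====
-- def frequencyMatching(list, frequency):
--     for index in range(len(list) - 1, -1, -1):
--         if list[index] == frequency:
--             return chr(index + 97)
--     return ''
-- ===== Notes on version B (the rewrite author's own statement) =====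
-- stated objective: simpler
-- what changed: B scans the list from the last index downwards and returns immediately at the first reverse match (chr(index+97)), instead of A's forward pass that keeps overwriting a 'character' accumulator to remember the last match.
import Mathlib
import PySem

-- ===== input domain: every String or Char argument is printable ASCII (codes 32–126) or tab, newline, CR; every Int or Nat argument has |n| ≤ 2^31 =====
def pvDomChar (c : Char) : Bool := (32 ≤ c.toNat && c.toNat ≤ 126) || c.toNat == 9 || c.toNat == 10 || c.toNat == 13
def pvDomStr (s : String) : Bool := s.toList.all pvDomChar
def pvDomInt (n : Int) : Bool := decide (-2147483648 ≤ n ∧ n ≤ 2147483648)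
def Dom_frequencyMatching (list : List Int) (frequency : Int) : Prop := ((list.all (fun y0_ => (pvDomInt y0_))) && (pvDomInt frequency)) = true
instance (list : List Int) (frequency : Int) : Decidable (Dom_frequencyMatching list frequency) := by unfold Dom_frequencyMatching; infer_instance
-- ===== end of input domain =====

-- B replaces A's forward scan with an overwritten accumulator by a reverse scan that
-- returns at the first match (simpler, early exit); return values are identical.

-- ===== PORT A =====
-- A: forward loop, index counted alongside; on a match the character accumulator is
-- overwritten with chr(index+97); the accumulator after the whole loop is returned.
def frequencyMatching (list : List Int) (frequency : Int) : String :=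
  (list.foldl (fun (s : Int × String) (_j : Int) =>
      if PySem.List.pyGet? list s.1 = some frequency then
        (s.1 + 1, String.ofList [Char.ofNat (s.1 + 97).toNat])
      else
        (s.1 + 1, s.2))
    ((0 : Int), "")).2

-- ===== PORT B =====
-- B: for index in range(len(list)-1, -1, -1): early return on match.
-- fmAltGo list frequency k scans indices k-1, k-2, …, 0.
def fmAltGo (list : List Int) (frequency : Int) : Nat → String
  | 0 => ""
  | k + 1 =>
    if PySem.List.pyGet? list (k : Int) = some frequency then
      String.ofList [Char.ofNat (k + 97)]
    else
      fmAltGo list frequency k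

def frequencyMatching_alt (list : List Int) (frequency : Int) : String :=
  fmAltGo list frequency list.length

-- ===== PRECONDITION & SPEC =====
def Spec_frequencyMatching (list : List Int) (frequency : Int) (out : String) : Prop := out = frequencyMatching_alt list frequency
instance (list : List Int) (frequency : Int) (out : String) : Decidable (Spec_frequencyMatching list frequency out) := by unfold Spec_frequencyMatching; infer_instance

-- ===== CLAIM (what is proved, stated in full; the proofs are below) =====
def Claim_equal_frequencyMatching : Prop := ∀ (list : List Int) (frequency : Int), Dom_frequencyMatching list frequency → Spec_frequencyMatching list frequency (frequencyMatching list frequency)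

-- ===== LEMMAS AND PROOFS =====

-- first match scanning downwards: fmd lo f looks at indices lo+f-1, …, lo (from top).
def fmd (list : List Int) (frequency : Int) (lo : Nat) : Nat → Option Nat
  | 0 => none
  | f + 1 =>
    match fmd list frequency (lo + 1) f with
    | some j => some j
    | none => if PySem.List.pyGet? list (lo : Int) = some frequency then some lo else none

-- peel the TOP index off fmd
theorem fmd_succ (list : List Int) (frequency : Int) (lo f : Nat) :
    fmd list frequency lo (f + 1) =
      if PySem.List.pyGet? list ((lo + f : Nat) : Int) = some frequency then some (lo + f)
      else fmd list frequency lo f := by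
  induction f generalizing lo with
  | zero => simp [fmd]
  | succ f ih =>
    rw [show lo + (f+1) = (lo+1) + f by omega]
    conv_lhs => rw [fmd]
    rw [ih (lo+1)]
    conv_rhs => rw [fmd]
    split_ifs with h <;> simp

theorem fmAltGo_eq_fmd (list : List Int) (frequency : Int) (k : Nat) :
    fmAltGo list frequency k =
      (match fmd list frequency 0 k with
       | some j => String.ofList [Char.ofNat (j + 97)]
       | none => "") := by
  induction k with
  | zero => simp [fmAltGo, fmd]
  | succ k ih =>
    rw [fmd_succ]
    simp only [Nat.zero_add]
    rw [fmAltGo]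
    split_ifs with h
    · rfl
    · rw [ih]

theorem foldA_eq_fmd (list : List Int) (frequency : Int) (l' : List Int) (i : Nat) (c : String) :
    (l'.foldl (fun (s : Int × String) (_j : Int) =>
      if PySem.List.pyGet? list s.1 = some frequency then
        (s.1 + 1, String.ofList [Char.ofNat (s.1 + 97).toNat])
      else
        (s.1 + 1, s.2)) (((i : Nat) : Int), c)).2 =
      (match fmd list frequency i l'.length with
       | some j => String.ofList [Char.ofNat (j + 97)]
       | none => c) := by
  induction l' generalizing i c with
  | nil => simp [fmd]
  | cons x l' ih =>
    simp only [List.foldl_cons, List.length_cons]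
    have hcast : ((i : Nat) : Int) + 1 = (((i + 1 : Nat)) : Int) := by push_cast; ring
    have hnat : ((i : Int) + 97).toNat = i + 97 := by omega
    conv_rhs => rw [fmd]
    split_ifs with h
    · rw [hnat, hcast, ih]
      cases fmd list frequency (i + 1) l'.length with
      | none => simp
      | some j => simp
    · rw [hcast, ih]
      cases fmd list frequency (i + 1) l'.length with
      | none => simp
      | some j => simp

theorem frequencyMatching_spec : Claim_equal_frequencyMatching := by
  intro list frequency _
  unfold Spec_frequencyMatching frequencyMatching frequencyMatching_alt
  rw [fmAltGo_eq_fmd]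
  have h := foldA_eq_fmd list frequency list 0 ""
  simpa using h
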